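-- pv_equiv track=rewrite | github.com/yoavSilber/NLPproject | ProjectStatistics.py | dependency_tree_depth
-- ===== SOURCE A (Python) =====
-- def dependency_tree_depth(tree):
--     tokens = tree.get("tokens", [])
--     if not tokens:
--         return 0
--
--     children_map = {i: [] for i in range(len(tokens))}
--     root_index = None
--
--     for i, token in enumerate(tokens):
--         syntax = token.get("syntax", {})
--         head_idx = syntax.get("dep_head_idx")
--         if head_idx == -1:
--             root_index = i
--         elif head_idx is not None and 0 <= head_idx < len(tokens):
--             children_map[head_idx].append(i)
--
--     if root_index is None:
--         return 1
--
--     def get_depth(index):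
--         if not children_map[index]:
--             return 1
--         return 1 + max(get_depth(child) for child in children_map[index])
--
--     return get_depth(root_index)
-- ===== SOURCE B (Python) =====
-- def dependency_tree_depth(tree):
--     tokens = tree.get("tokens", [])
--     n = len(tokens)
--     if n == 0:
--         return 0
--
--     # one pass to collect children into a plain list-of-lists
--     children = [[] for _ in range(n)]
--     for i, token in enumerate(tokens):
--         h = token.get("syntax", {}).get("dep_head_idx")
--         if h is not None and 0 <= h < n:
--             children[h].append(i)
--
--     # root = last index whose head is -1 (first found scanning backwards)
--     root = next((i for i in range(n - 1, -1, -1)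
--                  if tokens[i].get("syntax", {}).get("dep_head_idx") == -1), None)
--     if root is None:
--         return 1
--
--     # iterative level-order walk instead of recursive DFS
--     depth = 0
--     level = [root]
--     while level:
--         depth += 1
--         level = [c for i in level for c in children[i]]
--     return depth
-- ===== Notes on version B (the rewrite author's own statement) =====
-- stated objective: alternative
-- what changed: B stores children in a plain list-of-lists instead of a dict, finds the root by an early-exit reversed scan instead of overwriting during the main loop, and counts depth with an iterative level-order (BFS) loop instead of recursive DFS with max.
import Mathlib
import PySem

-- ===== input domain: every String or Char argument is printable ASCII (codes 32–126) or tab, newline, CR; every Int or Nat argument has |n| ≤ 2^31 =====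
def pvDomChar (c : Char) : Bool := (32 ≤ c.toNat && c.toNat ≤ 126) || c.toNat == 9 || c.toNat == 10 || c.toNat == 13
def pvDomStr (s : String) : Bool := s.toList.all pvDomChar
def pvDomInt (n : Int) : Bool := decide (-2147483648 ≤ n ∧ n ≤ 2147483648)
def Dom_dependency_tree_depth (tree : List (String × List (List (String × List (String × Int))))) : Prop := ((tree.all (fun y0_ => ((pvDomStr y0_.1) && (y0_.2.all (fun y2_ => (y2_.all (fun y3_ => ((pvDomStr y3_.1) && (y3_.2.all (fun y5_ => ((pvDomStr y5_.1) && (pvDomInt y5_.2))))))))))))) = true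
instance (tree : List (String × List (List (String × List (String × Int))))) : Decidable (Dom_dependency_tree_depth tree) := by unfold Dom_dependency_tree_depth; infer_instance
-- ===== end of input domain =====

-- B replaces A's recursive DFS over a dict-of-children with a list-of-lists children table,
-- a reversed early-exit root scan, and an iterative level-order (BFS) depth count (objective: alternative).

-- ===== PORT A =====

-- token.get("syntax", {}).get("dep_head_idx")
def pvHeadA (token : List (String × List (String × Int))) : Option Int :=
  PySem.Dict.get? (PySem.Dict.mk (PySem.Dict.getD (PySem.Dict.mk token) "syntax" [])) "dep_head_idx"

-- children_map = {i: [] for i in range(len(tokens))}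
def pvInitA (n : Nat) : PySem.Dict Int (List Int) :=
  (PySem.List.pyRange 0 (n : Int) 1).foldl (fun d i => d.insert i []) PySem.Dict.empty

-- one step of A's 'for i, token in enumerate(tokens)' loop (state: children_map, root_index)
def pvStepA (n : Int) (st : PySem.Dict Int (List Int) × Option Int)
    (p : Int × (List (String × List (String × Int)))) : PySem.Dict Int (List Int) × Option Int :=
  -- head_idx := token.get("syntax", {}).get("dep_head_idx")
  if pvHeadA p.2 = some (-1) then (st.1, some p.1)
  else match pvHeadA p.2 with
    | some hv =>
        if 0 ≤ hv ∧ hv < n then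
          -- children_map[head_idx].append(i); the key is always present (0 ≤ hv < n)
          (PySem.Dict.modify st.1 hv [] (fun l => l ++ [p.1]), st.2)
        else st
    | none => st

-- max(...) over a nonempty generator; [] case is unreachable in A
def pvMaxA : List Int → Int
  | [] => 0
  | x :: xs => xs.foldl max x

-- get_depth, with fuel: Python's recursion depth is at most len(tokens), so fuel = len(tokens) suffices
def pvGetDepthA (cm : PySem.Dict Int (List Int)) : Nat → Int → Int
  | 0, _ => 0
  | f + 1, index =>
    -- children_map[index]; the key is always present for reached indices
    if cm.getD index [] = [] then 1
    else 1 + pvMaxA ((cm.getD index []).map (fun c => pvGetDepthA cm f c))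

def dependency_tree_depth (tree : List (String × List (List (String × List (String × Int))))) : Int :=
  let tokens := PySem.Dict.getD (PySem.Dict.mk tree) "tokens" []
  if tokens = [] then 0
  else
    let st := (PySem.List.enumerate tokens 0).foldl (pvStepA (tokens.length : Int)) (pvInitA tokens.length, none)
    match st.2 with
    | none => 1
    | some r => pvGetDepthA st.1 tokens.length r

-- ===== PORT B =====

-- token.get("syntax", {}).get("dep_head_idx")
def pvHeadB (token : List (String × List (String × Int))) : Option Int :=
  PySem.Dict.get? (PySem.Dict.mk (PySem.Dict.getD (PySem.Dict.mk token) "syntax" [])) "dep_head_idx"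

-- children = [[] for _ in range(n)]; for i, token in enumerate(tokens): … children[h].append(i)
def pvChildrenB (n : Nat) (tokens : List (List (String × List (String × Int)))) : List (List Int) :=
  (PySem.List.enumerate tokens 0).foldl
    (fun cl p =>
      match pvHeadB p.2 with
      | some h => if 0 ≤ h ∧ h < (n : Int) then cl.modify h.toNat (fun l => l ++ [p.1]) else cl
      | none => cl)
    (List.replicate n [])

-- root = next((i for i in range(n - 1, -1, -1) if tokens[i].get("syntax", {}).get("dep_head_idx") == -1), None)
def pvRootB (n : Nat) (tokens : List (List (String × List (String × Int)))) : Option Int :=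
  (PySem.List.pyRange ((n : Int) - 1) (-1) (-1)).find?
    (fun i => decide (pvHeadB ((PySem.List.pyGet? tokens i).getD []) = some (-1)))   -- i is always in range

-- while level: depth += 1; level = [c for i in level for c in children[i]]
-- fuel: the number of nonempty levels is at most len(tokens), so fuel = len(tokens) suffices
def pvLevelsB (cl : List (List Int)) : Nat → List Int → Int → Int
  | 0, _, depth => depth
  | f + 1, level, depth =>
    if level = [] then depth
    else pvLevelsB cl f (level.flatMap (fun i => (PySem.List.pyGet? cl i).getD [])) (depth + 1)

def dependency_tree_depth_alt (tree : List (String × List (List (String × List (String × Int))))) : Int :=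
  let tokens := PySem.Dict.getD (PySem.Dict.mk tree) "tokens" []
  let n := tokens.length
  if n = 0 then 0
  else
    let cl := pvChildrenB n tokens
    match pvRootB n tokens with
    | none => 1
    | some r => pvLevelsB cl n [r] 0

-- ===== PRECONDITION & SPEC =====
def Spec_dependency_tree_depth (tree : List (String × List (List (String × List (String × Int))))) (out : Int) : Prop := out = dependency_tree_depth_alt tree
instance (tree : List (String × List (List (String × List (String × Int))))) (out : Int) : Decidable (Spec_dependency_tree_depth tree out) := by unfold Spec_dependency_tree_depth; infer_instance

-- ===== CLAIM (what is proved, stated in full; the proofs are below) =====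
def Claim_equal_dependency_tree_depth : Prop := ∀ (tree : List (String × List (List (String × List (String × Int))))), Dom_dependency_tree_depth tree → Spec_dependency_tree_depth tree (dependency_tree_depth tree)

-- ===== LEMMAS AND PROOFS =====

-- pvHeadB is the same accessor as pvHeadA
theorem pvHeadB_eq (t : List (String × List (String × Int))) : pvHeadB t = pvHeadA t := rfl

-- running max over a list, from 0 (proof-side view of both programs' maxima)
def pvM (l : List Int) : Int := l.foldl max 0

theorem foldl_max_init (xs : List Int) (s t : Int) :
    xs.foldl max (max s t) = max s (xs.foldl max t) := by
  induction xs generalizing t with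
  | nil => rfl
  | cons x xs ih =>
      simp only [List.foldl_cons]
      rw [max_assoc, ih]

theorem le_pvM (l : List Int) : 0 ≤ pvM l := by
  unfold pvM
  have h : ∀ (s : Int), 0 ≤ s → 0 ≤ l.foldl max s := by
    induction l with
    | nil => intro s hs; simpa using hs
    | cons x xs ih => intro s hs; exact ih _ (le_trans hs (le_max_left _ _))
  exact h 0 le_rfl

theorem pvM_append (a b : List Int) : pvM (a ++ b) = max (pvM a) (pvM b) := by
  unfold pvM
  rw [List.foldl_append]
  have h := foldl_max_init b (a.foldl max 0) 0
  rw [max_eq_left (show (0:Int) ≤ a.foldl max 0 from le_pvM a)] at h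
  exact h

theorem pvM_flat (L : List Int) (g : Int → List Int) :
    pvM (L.flatMap g) = pvM (L.map (fun i => pvM (g i))) := by
  induction L with
  | nil => rfl
  | cons x xs ih =>
      rw [List.flatMap_cons, pvM_append, ih]
      show _ = pvM (pvM (g x) :: _)
      have : ∀ (y : Int) (l : List Int), 0 ≤ y → pvM (y :: l) = max y (pvM l) := by
        intro y l hy
        show pvM ([y] ++ l) = _
        rw [pvM_append]
        unfold pvM
        simp [max_eq_right hy]
      rw [this _ _ (le_pvM (g x))]

theorem pvM_cons (y : Int) (l : List Int) (hy : 0 ≤ y) : pvM (y :: l) = max y (pvM l) := by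
  show pvM ([y] ++ l) = _
  rw [pvM_append]
  unfold pvM
  simp [max_eq_right hy]

theorem pvMaxA_eq_pvM (l : List Int) (hne : l ≠ []) (hpos : ∀ x ∈ l, 0 ≤ x) :
    pvMaxA l = pvM l := by
  match l with
  | x :: xs =>
      unfold pvMaxA pvM
      simp only [List.foldl_cons]
      have hx : 0 ≤ x := hpos x (by simp)
      rw [max_eq_right hx]

theorem pvM_map_one_add (L : List Int) (m : Int → Int) (hne : L ≠ [])
    (hm : ∀ i ∈ L, 0 ≤ m i) :
    pvM (L.map (fun i => 1 + m i)) = 1 + pvM (L.map m) := by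
  induction L with
  | nil => exact absurd rfl hne
  | cons x xs ih =>
      have hx : 0 ≤ m x := hm x (by simp)
      by_cases hxs : xs = []
      · subst hxs
        simp only [List.map_cons, List.map_nil]
        rw [pvM_cons _ _ (by omega), pvM_cons _ _ hx]
        unfold pvM
        simp only [List.foldl_nil]
        omega
      · have ih' := ih hxs (fun i hi => hm i (by simp [hi]))
        simp only [List.map_cons]
        rw [pvM_cons _ _ (by omega), pvM_cons _ _ hx, ih']
        omega

-- depth values are nonnegative
theorem pvGetDepthA_nonneg (cm : PySem.Dict Int (List Int)) (f : Nat) (i : Int) :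
    0 ≤ pvGetDepthA cm f i := by
  induction f generalizing i with
  | zero => simp [pvGetDepthA]
  | succ f ih =>
      rw [pvGetDepthA]
      split
      · omega
      · next hne =>
          have : 0 ≤ pvMaxA ((cm.getD i []).map (fun c => pvGetDepthA cm f c)) := by
            rw [pvMaxA_eq_pvM _ (by simpa using hne) (by
              intro x hx
              simp only [List.mem_map] at hx
              obtain ⟨c, _, rfl⟩ := hx
              exact ih c)]
            exact le_pvM _
          omega

-- unconditional unfolding of A's get_depth
theorem pvGetDepthA_succ (cm : PySem.Dict Int (List Int)) (f : Nat) (i : Int) :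
    pvGetDepthA cm (f + 1) i = 1 + pvM ((cm.getD i []).map (fun c => pvGetDepthA cm f c)) := by
  rw [pvGetDepthA]
  split
  · next h => simp [h, pvM]
  · next h =>
      rw [pvMaxA_eq_pvM _ (by simpa using h) (by
        intro x hx
        simp only [List.mem_map] at hx
        obtain ⟨c, _, rfl⟩ := hx
        exact pvGetDepthA_nonneg cm f c)]

theorem pvLevelsB_nil (cl : List (List Int)) (f : Nat) (d : Int) :
    pvLevelsB cl f [] d = d := by
  cases f <;> simp [pvLevelsB]

-- ===== the build invariant: A's dict of children agrees with B's list of children =====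

theorem pvInitA_getD (n : Nat) (k : Int) : (pvInitA n).getD k [] = [] := by
  unfold pvInitA
  have h : ∀ (lst : List Int) (d : PySem.Dict Int (List Int)),
      (∀ k' : Int, d.getD k' [] = []) →
      ((lst.foldl (fun d i => d.insert i []) d).getD k [] = []) := by
    intro lst
    induction lst with
    | nil => intro d hd; exact hd k
    | cons x xs ih =>
        intro d hd
        simp only [List.foldl_cons]
        exact ih _ (by intro k'; rw [PySem.Dict.getD_insert]; split <;> simp [hd])
  exact h _ _ (fun k' => PySem.Dict.getD_empty k' [])

theorem pyGet_replicate_getD (n : Nat) (k : Int) :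
    ((PySem.List.pyGet? (List.replicate n ([] : List Int)) k).getD []) = [] := by
  cases h : PySem.List.pyGet? (List.replicate n ([] : List Int)) k with
  | none => rfl
  | some x =>
      have := PySem.List.mem_of_pyGet?_eq_some _ h
      have := List.eq_of_mem_replicate this
      simp [this]

-- joint invariant over the two build folds
theorem build_inv (n : Nat)
    (lst : List (Int × (List (String × List (String × Int)))))
    (d : PySem.Dict Int (List Int)) (r : Option Int) (cl : List (List Int))
    (hlen : cl.length = n)
    (hidx : ∀ p ∈ lst, 0 ≤ p.1)
    (hagree : ∀ k : Int, 0 ≤ k → d.getD k [] = (PySem.List.pyGet? cl k).getD [])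
    (hmem : ∀ (k : Int), ∀ j ∈ d.getD k [], 0 ≤ j) :
    (∀ k : Int, 0 ≤ k →
      ((lst.foldl (pvStepA (n : Int)) (d, r)).1).getD k [] =
      (PySem.List.pyGet?
        (lst.foldl (fun cl p =>
          match pvHeadB p.2 with
          | some h => if 0 ≤ h ∧ h < (n : Int) then cl.modify h.toNat (fun l => l ++ [p.1]) else cl
          | none => cl) cl) k).getD []) ∧
    (∀ (k : Int), ∀ j ∈ ((lst.foldl (pvStepA (n : Int)) (d, r)).1).getD k [], 0 ≤ j) := by
  induction lst generalizing d r cl with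
  | nil => exact ⟨fun k hk => hagree k hk, hmem⟩
  | cons p ps ih =>
      simp only [List.foldl_cons]
      have hp : 0 ≤ p.1 := hidx p (by simp)
      have hidx' : ∀ q ∈ ps, 0 ≤ q.1 := fun q hq => hidx q (by simp [hq])
      -- analyse one step
      rcases hh : pvHeadA p.2 with _ | hv
      · -- no head: both states unchanged
        have hstepA : pvStepA (n : Int) (d, r) p = (d, r) := by
          unfold pvStepA; rw [hh]; simp
        have hstepB : (match pvHeadB p.2 with
            | some h => if 0 ≤ h ∧ h < (n : Int) then cl.modify h.toNat (fun l => l ++ [p.1]) else cl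
            | none => cl) = cl := by
          rw [pvHeadB_eq, hh]
        rw [hstepA, hstepB]
        exact ih d r cl hlen hidx' hagree hmem
      · by_cases hneg : hv = -1
        · -- root update: children states unchanged
          subst hneg
          have hstepA : pvStepA (n : Int) (d, r) p = (d, some p.1) := by
            unfold pvStepA; rw [hh]; simp
          have hstepB : (match pvHeadB p.2 with
              | some h => if 0 ≤ h ∧ h < (n : Int) then cl.modify h.toNat (fun l => l ++ [p.1]) else cl
              | none => cl) = cl := by
            rw [pvHeadB_eq, hh]
            norm_num
          rw [hstepA, hstepB]
          exact ih d (some p.1) cl hlen hidx' hagree hmem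
        · by_cases hrange : 0 ≤ hv ∧ hv < (n : Int)
          · -- in-range head: both append p.1 at index hv
            have hstepA : pvStepA (n : Int) (d, r) p =
                (PySem.Dict.modify d hv [] (fun l => l ++ [p.1]), r) := by
              unfold pvStepA; rw [hh]; simp [hneg, hrange]
            have hstepB : (match pvHeadB p.2 with
                | some h => if 0 ≤ h ∧ h < (n : Int) then cl.modify h.toNat (fun l => l ++ [p.1]) else cl
                | none => cl) = cl.modify hv.toNat (fun l => l ++ [p.1]) := by
              rw [pvHeadB_eq, hh]
              simp [hrange]
            rw [hstepA, hstepB]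
            refine ih _ r _ (by rw [List.length_modify]; exact hlen) hidx' ?_ ?_
            · intro k hk
              by_cases hkv : k = hv
              · subst hkv
                rw [PySem.Dict.getD_modify_self]
                rw [PySem.List.pyGet?_of_nonneg (cl.modify k.toNat (fun l => l ++ [p.1])) hk, List.getElem?_modify]
                have hlt : k.toNat < cl.length := by omega
                rw [List.getElem?_eq_getElem hlt]
                have : PySem.List.pyGet? cl k = some cl[k.toNat] := by
                  rw [PySem.List.pyGet?_of_nonneg cl hk, List.getElem?_eq_getElem hlt]
                rw [hagree k hk, this]
                simp
              · rw [PySem.Dict.getD_modify_of_ne _ _ _ hkv]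
                rw [hagree k hk]
                rw [PySem.List.pyGet?_of_nonneg cl hk,
                    PySem.List.pyGet?_of_nonneg (cl.modify hv.toNat (fun l => l ++ [p.1])) hk]
                rw [List.getElem?_modify]
                have hne2 : hv.toNat ≠ k.toNat := by omega
                cases cl[k.toNat]? <;> simp [hne2]
            · intro k j hj
              by_cases hkv : k = hv
              · subst hkv
                rw [PySem.Dict.getD_modify_self] at hj
                rcases List.mem_append.mp hj with h' | h'
                · exact hmem _ _ h'
                · simp at h'; omega
              · rw [PySem.Dict.getD_modify_of_ne _ _ _ hkv] at hj
                exact hmem _ _ hj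
          · -- out-of-range head: both unchanged
            have hstepA : pvStepA (n : Int) (d, r) p = (d, r) := by
              unfold pvStepA; rw [hh]; simp [hneg, hrange]
            have hstepB : (match pvHeadB p.2 with
                | some h => if 0 ≤ h ∧ h < (n : Int) then cl.modify h.toNat (fun l => l ++ [p.1]) else cl
                | none => cl) = cl := by
              rw [pvHeadB_eq, hh]
              simp [hrange]
            rw [hstepA, hstepB]
            exact ih d r cl hlen hidx' hagree hmem

-- ===== root agreement =====

theorem pvStepA_snd (nI : Int) (d : PySem.Dict Int (List Int)) (r : Option Int)
    (p : Int × (List (String × List (String × Int)))) :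
    ∃ d', pvStepA nI (d, r) p = (d', if pvHeadA p.2 = some (-1) then some p.1 else r) := by
  unfold pvStepA
  by_cases hc : pvHeadA p.2 = some (-1)
  · rw [if_pos hc, if_pos hc]
    exact ⟨d, rfl⟩
  · rw [if_neg hc, if_neg hc]
    cases pvHeadA p.2 with
    | none => exact ⟨d, rfl⟩
    | some hv =>
        dsimp only
        split
        · exact ⟨_, rfl⟩
        · exact ⟨d, rfl⟩

theorem rootA_proj (nI : Int) (lst : List (Int × (List (String × List (String × Int)))))
    (d : PySem.Dict Int (List Int)) (r : Option Int) :
    (lst.foldl (pvStepA nI) (d, r)).2 =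
    lst.foldl (fun r p => if pvHeadA p.2 = some (-1) then some p.1 else r) r := by
  induction lst generalizing d r with
  | nil => rfl
  | cons p ps ih =>
      simp only [List.foldl_cons]
      obtain ⟨d', hd'⟩ := pvStepA_snd nI d r p
      rw [hd', ih]

-- last match of a fold = first match of the reversed list
theorem lastMatch_eq_find_reverse {α : Type} (P : α → Prop) [DecidablePred P]
    (lst : List (Int × α)) (r0 : Option Int) :
    lst.foldl (fun r p => if P p.2 then some p.1 else r) r0 =
    ((lst.reverse.find? (fun p => decide (P p.2))).map (·.1)).getD r0 := by
  induction lst using List.reverseRecOn generalizing r0 with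
  | nil => rfl
  | append_singleton l p ih =>
      rw [List.foldl_append]
      simp only [List.foldl_cons, List.foldl_nil, List.reverse_append, List.reverse_cons,
        List.reverse_nil, List.nil_append, List.cons_append, List.find?_cons]
      by_cases hp : P p.2
      · simp [hp]
      · simp only [hp, decide_false, if_false]
        simpa using ih r0

theorem root_eq (tokens : List (List (String × List (String × Int))))
    (d : PySem.Dict Int (List Int)) :
    ((PySem.List.enumerate tokens 0).foldl (pvStepA (tokens.length : Int)) (d, none)).2 =
    pvRootB tokens.length tokens := by
  rw [rootA_proj]
  rw [lastMatch_eq_find_reverse (fun t => pvHeadA t = some (-1))]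
  unfold pvRootB
  rw [PySem.List.enumerate_eq_map_pyRange tokens []]
  rw [← List.map_reverse, List.find?_map]
  rw [PySem.List.pyRange_neg_one_eq_reverse]
  have harr : PySem.List.pyRange (-1 + 1) ((tokens.length : Int) - 1 + 1) =
      PySem.List.pyRange 0 (PySem.List.len tokens) := by
    simp only [PySem.List.len_eq]
    norm_num
  rw [harr]
  have hpred : (fun i => decide (pvHeadB ((PySem.List.pyGet? tokens i).getD []) = some (-1))) =
      ((fun p => decide (pvHeadA p.2 = some (-1))) ∘ fun j => (j, PySem.List.pyGetD tokens j [])) := rfl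
  rw [hpred]
  cases List.find? ((fun p => decide (pvHeadA p.2 = some (-1))) ∘ fun j => (j, PySem.List.pyGetD tokens j []))
      (PySem.List.pyRange 0 (PySem.List.len tokens)).reverse <;> simp

-- ===== BFS level count = DFS max depth =====

theorem levels_eq_depth (cm : PySem.Dict Int (List Int)) (cl : List (List Int))
    (hagree : ∀ k : Int, 0 ≤ k → cm.getD k [] = (PySem.List.pyGet? cl k).getD [])
    (hmem : ∀ (k : Int), ∀ j ∈ cm.getD k [], 0 ≤ j) :
    ∀ (f : Nat) (L : List Int) (d : Int), L ≠ [] → (∀ i ∈ L, 0 ≤ i) →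
      pvLevelsB cl f L d = d + pvM (L.map (fun i => pvGetDepthA cm f i)) := by
  intro f
  induction f with
  | zero =>
      intro L d hne hpos
      have : L.map (fun i => pvGetDepthA cm 0 i) = L.map (fun _ => (0:Int)) := by
        simp [pvGetDepthA]
      rw [pvLevelsB, this]
      have : ∀ (L' : List Int), pvM (L'.map (fun _ => (0:Int))) = 0 := by
        intro L'
        induction L' with
        | nil => rfl
        | cons x xs ih => rw [List.map_cons, pvM_cons _ _ le_rfl, ih]; simp
      rw [this]; omega
  | succ f ih =>
      intro L d hne hpos
      unfold pvLevelsB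
      rw [if_neg hne]
      have hflat : L.flatMap (fun i => (PySem.List.pyGet? cl i).getD []) =
          L.flatMap (fun i => cm.getD i []) := by
        apply List.flatMap_congr
        intro i hi
        rw [hagree i (hpos i hi)]
      rw [hflat]
      have hRHS : pvM (L.map (fun i => pvGetDepthA cm (f + 1) i)) =
          1 + pvM ((L.flatMap (fun i => cm.getD i [])).map (fun c => pvGetDepthA cm f c)) := by
        have h1 : L.map (fun i => pvGetDepthA cm (f + 1) i) =
            L.map (fun i => 1 + pvM ((cm.getD i []).map (fun c => pvGetDepthA cm f c))) := by
          apply List.map_congr_left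
          intro i hi
          exact pvGetDepthA_succ cm f i
        rw [h1, pvM_map_one_add _ _ hne (fun i hi => le_pvM _)]
        congr 1
        rw [List.map_flatMap, pvM_flat]
      rw [hRHS]
      set C := L.flatMap (fun i => cm.getD i []) with hC
      by_cases hCnil : C = []
      · rw [hCnil, pvLevelsB_nil]
        simp [pvM]
      · have hCpos : ∀ i ∈ C, 0 ≤ i := by
          intro i hi
          rw [hC, List.mem_flatMap] at hi
          obtain ⟨k, _, hk⟩ := hi
          exact hmem k i hk
        rw [ih C (d + 1) hCnil hCpos]
        omega

-- ===== main theorem =====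

theorem main_eq (tree : List (String × List (List (String × List (String × Int))))) :
    dependency_tree_depth tree = dependency_tree_depth_alt tree := by
  unfold dependency_tree_depth dependency_tree_depth_alt
  set tokens := PySem.Dict.getD (PySem.Dict.mk tree) "tokens" [] with htok
  by_cases hnil : tokens = []
  · simp [hnil]
  · have hn : tokens.length ≠ 0 := by simpa using hnil
    rw [if_neg hnil, if_neg hn]
    have hroot := root_eq tokens (pvInitA tokens.length)
    set st := (PySem.List.enumerate tokens 0).foldl (pvStepA (tokens.length : Int))
        (pvInitA tokens.length, none) with hst
    have hinv := build_inv tokens.length (PySem.List.enumerate tokens 0)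
        (pvInitA tokens.length) none (List.replicate tokens.length [])
        (by simp)
        (by
          intro p hp
          have : p.1 ∈ (PySem.List.enumerate tokens 0).map (·.1) := List.mem_map_of_mem hp
          rw [PySem.List.map_fst_enumerate] at this
          rw [PySem.List.mem_pyRange_one] at this
          exact this.1)
        (by intro k hk; rw [pvInitA_getD, pyGet_replicate_getD])
        (by intro k j hj; rw [pvInitA_getD] at hj; exact absurd hj (List.not_mem_nil))
    have hclB : ((PySem.List.enumerate tokens 0).foldl
          (fun cl p =>
            match pvHeadB p.2 with
            | some h => if 0 ≤ h ∧ h < ((tokens.length : Nat) : Int) then cl.modify h.toNat (fun l => l ++ [p.1]) else cl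
            | none => cl) (List.replicate tokens.length [])) = pvChildrenB tokens.length tokens := rfl
    rw [hclB] at hinv
    rw [← hst] at hinv
    show (match st.2 with
      | none => (1 : Int)
      | some r => pvGetDepthA st.1 tokens.length r) =
      (match pvRootB tokens.length tokens with
      | none => (1 : Int)
      | some r => pvLevelsB (pvChildrenB tokens.length tokens) tokens.length [r] 0)
    rw [hroot]
    cases hr : pvRootB tokens.length tokens with
    | none => rfl
    | some r =>
        have hrpos : 0 ≤ r := by
          have := List.mem_of_find?_eq_some hr
          rw [PySem.List.mem_pyRange_neg_one] at this
          omega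
        show pvGetDepthA st.1 tokens.length r =
          pvLevelsB (pvChildrenB tokens.length tokens) tokens.length [r] 0
        rw [levels_eq_depth st.1 (pvChildrenB tokens.length tokens) hinv.1 hinv.2
            tokens.length [r] 0 (by simp) (by simpa using hrpos)]
        simp only [List.map_cons, List.map_nil]
        rw [pvM_cons _ _ (pvGetDepthA_nonneg _ _ _), ]
        unfold pvM
        simp only [List.foldl_nil]
        rw [max_eq_left (pvGetDepthA_nonneg _ _ _)]
        omega

-- ===== VERDICT (by name: the statement is the Claim_ definition above) =====
theorem dependency_tree_depth_spec : Claim_equal_dependency_tree_depth := by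
  intro tree _
  unfold Spec_dependency_tree_depth
  exact main_eq tree
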